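-- pv_equiv track=rewrite | github.com/aj-22/dataincubator | assessment_code.py | getNumberOfSeqFast
-- ===== SOURCE A (Python) =====
-- def getNumberOfSeqFast(n,k,j):
--     term=1
--     modNum=10**10+7
--     for i in range(n-4):
--         term*=(k-1)
--         term=term%modNum
--     term*=((k-1)+(k-2)*(k-2))
--     return term
-- ===== SOURCE B (Python) =====
-- def getNumberOfSeqFast(n, k, j):
--     modNum = 10**10 + 7
--     e = n - 4
--     if e < 0:
--         e = 0
--     return pow(k - 1, e, modNum) * ((k - 1) + (k - 2) * (k - 2))
-- ===== Notes on version B (the rewrite author's own statement) =====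
-- stated objective: faster
-- what changed: Replaces the O(n) multiply-and-reduce loop with a single three-argument pow (fast modular exponentiation) of (k-1) to the power max(0, n-4) mod 10**10+7.
import Mathlib
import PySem

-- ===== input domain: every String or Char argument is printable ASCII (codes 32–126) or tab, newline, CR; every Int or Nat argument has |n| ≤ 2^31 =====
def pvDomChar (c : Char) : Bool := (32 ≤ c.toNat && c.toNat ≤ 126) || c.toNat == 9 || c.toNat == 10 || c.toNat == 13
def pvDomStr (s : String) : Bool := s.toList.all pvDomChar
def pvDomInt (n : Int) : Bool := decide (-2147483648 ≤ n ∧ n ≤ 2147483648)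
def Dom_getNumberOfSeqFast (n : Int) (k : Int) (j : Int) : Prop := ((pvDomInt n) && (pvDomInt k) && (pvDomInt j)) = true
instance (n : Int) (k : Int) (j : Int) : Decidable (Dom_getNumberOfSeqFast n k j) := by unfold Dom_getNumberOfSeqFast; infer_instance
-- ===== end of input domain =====

-- B replaces A's O(n) multiply-and-reduce loop with one fast modular exponentiation (Python's 3-argument pow); objective: faster.


-- ===== PORT A =====
-- A's 'for i in range(n-4)' (i unused) as the obvious structural recursion on the
-- iteration count, carrying the same state 'term'.
def powLoop (b : Int) (M : Int) : Nat → Int → Int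
  | 0, term => term
  | m + 1, term => powLoop b M m (PySem.Int.mod (term * b) M)

def getNumberOfSeqFast (n : Int) (k : Int) (j : Int) : Int :=
  let modNum : Int := 10 ^ 10 + 7
  let term : Int := powLoop (k - 1) modNum (n - 4).toNat 1
  term * ((k - 1) + (k - 2) * (k - 2))

-- ===== PORT B =====
def getNumberOfSeqFast_alt (n : Int) (k : Int) (j : Int) : Int :=
  let modNum : Int := 10 ^ 10 + 7
  let e : Int := if n - 4 < 0 then 0 else n - 4
  PySem.Int.powMod (k - 1) e.toNat modNum * ((k - 1) + (k - 2) * (k - 2))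

-- ===== PRECONDITION & SPEC =====
def Spec_getNumberOfSeqFast (n : Int) (k : Int) (j : Int) (out : Int) : Prop := out = getNumberOfSeqFast_alt n k j
instance (n : Int) (k : Int) (j : Int) (out : Int) : Decidable (Spec_getNumberOfSeqFast n k j out) := by unfold Spec_getNumberOfSeqFast; infer_instance

-- ===== CLAIM (what is proved, stated in full; the proofs are below) =====
def Claim_equal_getNumberOfSeqFast : Prop := ∀ (n : Int) (k : Int) (j : Int), Dom_getNumberOfSeqFast n k j → Spec_getNumberOfSeqFast n k j (getNumberOfSeqFast n k j)

-- ===== LEMMAS AND PROOFS =====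

-- A's loop starting from a reduced accumulator computes the reduced power.
theorem loop_eq (b : Int) (M : Int) (hM : 0 < M) :
    ∀ (m : Nat) (a : Int),
      powLoop b M m (PySem.Int.mod a M) = PySem.Int.mod (a * b ^ m) M := by
  intro m
  induction m with
  | zero => intro a; simp [powLoop]
  | succ m ih =>
      intro a
      have h1 : PySem.Int.mod (PySem.Int.mod a M * b) M = PySem.Int.mod (a * b) M := by
        rw [PySem.Int.mod_eq_emod_of_pos hM, PySem.Int.mod_eq_emod_of_pos hM,
            PySem.Int.mod_eq_emod_of_pos hM, Int.mul_emod, Int.emod_emod_of_dvd _ dvd_rfl,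
            ← Int.mul_emod]
      have h2 := ih (a * b)
      simp only [powLoop, h1, h2]
      ring_nf

theorem mod_one_big (M : Int) (hM : 1 < M) : PySem.Int.mod 1 M = 1 := by
  rw [PySem.Int.mod_eq_emod_of_pos (show (0:Int) < M by omega)]
  exact Int.emod_eq_of_lt (by omega) hM

-- A's loop with its actual initial accumulator 1.
theorem loop_one (b : Int) (M : Int) (hM : 1 < M) (m : Nat) :
    powLoop b M m 1 = PySem.Int.mod (b ^ m) M := by
  have h := loop_eq b M (by omega) m 1
  rwa [mod_one_big M hM, one_mul] at h

-- ===== VERDICT (by name: the statement is the Claim_ definition above) =====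
theorem getNumberOfSeqFast_spec : Claim_equal_getNumberOfSeqFast := by
  intro n k j _
  unfold Spec_getNumberOfSeqFast getNumberOfSeqFast getNumberOfSeqFast_alt
  simp only []
  rw [loop_one (k - 1) (10 ^ 10 + 7) (by norm_num), PySem.Int.powMod_eq]
  have he : (n - 4).toNat = (if n - 4 < 0 then (0:Int) else n - 4).toNat := by
    split <;> omega
  rw [he]
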